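-- pv_equiv track=rewrite | github.com/rikirenz/Network_Analysis_project | from_matrix_to_graph.py | _occurrences_counter
-- ===== SOURCE A (Python) =====
-- import operator
--
-- def _sort_dictionary(unsorted_dict):
--     sorted_list = sorted(unsorted_dict.items(), key=operator.itemgetter(0))
--     keys = []
--     counter = []
--     for item in sorted_list:
--         keys.append(item[0])
--         counter.append(item[1])
--
--     return keys, counter
--
-- def _occurrences_counter(dict_matrix):
--     """ Given a list where each value represents an entry in a monomodal
--     matrix. It returns the number of occurrences for the given matrix.
--     It does not count the 0 occurrences"""
--     counter = {}
--     matrix_list_without_0 = _remove_zero_from_monomodal_matrix(dict_matrix)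
--     for value in matrix_list_without_0:
--         try:
--             counter[value] += 1
--         except Exception:
--             counter[value] = 1
--
--     sorted_dictionary = _sort_dictionary(counter)
--     return sorted_dictionary
--
-- def _remove_zero_from_monomodal_matrix(dict_matrix):
--     """Given a list where each line represents an entry in a monomodal
--     matrix. It returns a list without 0. """
--     final_list = []
--     for entry in dict_matrix:
--         for value in dict_matrix[entry]:
--             com = dict_matrix[entry][value]
--             if com:
--                 final_list.append(com)
--     return final_list
-- ===== SOURCE B (Python) =====
-- def _occurrences_counter(dict_matrix):
--     """Flatten the truthy matrix values, sort them, and run-length encode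
--     the sorted list: each run gives one key and its occurrence count."""
--     values = sorted(v for row in dict_matrix.values() for v in row.values() if v)
--     keys = []
--     counter = []
--     i = 0
--     n = len(values)
--     while i < n:
--         v = values[i]
--         j = i + 1
--         while j < n and values[j] == v:
--             j += 1
--         keys.append(v)
--         counter.append(j - i)
--         i = j
--     return keys, counter
-- ===== Notes on version B (the rewrite author's own statement) =====
-- stated objective: alternative
-- what changed: Replaces A's dict-based counting (build a counter dict with try/except, sort its items by key, split into two lists) by sorting the flat list of truthy values once and run-length encoding it in a single sweep.
import Mathlib
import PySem

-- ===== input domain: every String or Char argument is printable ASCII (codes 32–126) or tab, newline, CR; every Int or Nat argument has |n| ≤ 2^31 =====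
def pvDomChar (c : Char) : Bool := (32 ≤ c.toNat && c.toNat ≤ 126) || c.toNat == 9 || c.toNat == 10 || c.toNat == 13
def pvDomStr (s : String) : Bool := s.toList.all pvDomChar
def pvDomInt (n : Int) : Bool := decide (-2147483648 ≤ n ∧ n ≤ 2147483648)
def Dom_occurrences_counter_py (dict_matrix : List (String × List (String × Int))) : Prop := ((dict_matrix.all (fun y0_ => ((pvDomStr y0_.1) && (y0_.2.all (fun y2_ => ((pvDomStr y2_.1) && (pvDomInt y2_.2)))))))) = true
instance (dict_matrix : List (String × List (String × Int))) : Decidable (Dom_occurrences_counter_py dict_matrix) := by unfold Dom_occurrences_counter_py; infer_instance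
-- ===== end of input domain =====

-- B replaces A's try/except dict counting + sort-of-items by sorting the flat
-- truthy values once and run-length encoding them (objective: alternative).

-- ===== PORT A =====
-- _remove_zero_from_monomodal_matrix: 'for entry in d: for value in d[entry]: com = d[entry][value]'
-- iterates the dicts' keys and looks each key up; keys are unique, so this is iteration over items.
def remove_zero_py (dict_matrix : List (String × List (String × Int))) : List Int :=
  ((PySem.Dict.ofList dict_matrix : PySem.Dict String (List (String × Int))).items).foldl
    (fun final_list entry =>
      ((PySem.Dict.ofList entry.2 : PySem.Dict String Int).items).foldl
        (fun acc p => if p.2 != 0 then acc ++ [p.2] else acc)   -- 'if com:' int truthiness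
        final_list)
    []

-- _sort_dictionary
def sort_dictionary_py (unsorted_dict : PySem.Dict Int Int) : List Int × List Int :=
  let sorted_list := PySem.List.sorted unsorted_dict.items (fun it => it.1) false
  sorted_list.foldl (fun kc item => (kc.1 ++ [item.1], kc.2 ++ [item.2])) ([], [])

def occurrences_counter_py (dict_matrix : List (String × List (String × Int))) : List Int × List Int :=
  let matrix_list_without_0 := remove_zero_py dict_matrix
  let counter := matrix_list_without_0.foldl
    (fun d value =>
      if d.contains value then d.insert value (d.getD value 0 + 1)   -- try: counter[value] += 1
      else d.insert value 1)                                         -- except: counter[value] = 1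
    PySem.Dict.empty
  sort_dictionary_py counter

-- ===== PORT B =====
-- the outer while loop of Source B over the tail of the sorted list; the inner
-- 'while j < n and values[j] == v: j += 1' is the run 'takeWhile (· == v)'
def pyB_runs : List Int → List Int × List Int
  | [] => ([], [])
  | v :: rest =>
    let same := rest.takeWhile (fun x => x == v)
    let r := pyB_runs (rest.dropWhile (fun x => x == v))
    (v :: r.1, ((1 + same.length : Nat) : Int) :: r.2)
termination_by l => l.length
decreasing_by
  simp only [List.length_cons]
  exact Nat.lt_succ_of_le (List.length_dropWhile_le _ _)

def occurrences_counter_py_alt (dict_matrix : List (String × List (String × Int))) : List Int × List Int :=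
  let values := PySem.List.sorted
    (((PySem.Dict.ofList dict_matrix : PySem.Dict String (List (String × Int))).values).flatMap
      (fun row => ((PySem.Dict.ofList row : PySem.Dict String Int).values).filter (fun v => v != 0)))
    (fun v => v) false
  pyB_runs values

-- ===== PRECONDITION & SPEC =====
def Spec_occurrences_counter_py (dict_matrix : List (String × List (String × Int))) (out : List Int × List Int) : Prop := out = occurrences_counter_py_alt dict_matrix
instance (dict_matrix : List (String × List (String × Int))) (out : List Int × List Int) : Decidable (Spec_occurrences_counter_py dict_matrix out) := by unfold Spec_occurrences_counter_py; infer_instance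

-- ===== CLAIM (what is proved, stated in full; the proofs are below) =====
def Claim_equal_occurrences_counter_py : Prop := ∀ (dict_matrix : List (String × List (String × Int))), Dom_occurrences_counter_py dict_matrix → Spec_occurrences_counter_py dict_matrix (occurrences_counter_py dict_matrix)

-- ===== LEMMAS AND PROOFS =====

-- A's inner append loop over one row's items = filtered-then-projected row values
theorem inner_foldl_eq (l : List (String × Int)) (a : List Int) :
    l.foldl (fun acc p => if p.2 != 0 then acc ++ [p.2] else acc) a
      = a ++ ((l.map (fun p => p.2)).filter (fun v => v != 0)) := by
  induction l generalizing a with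
  | nil => simp
  | cons p t ih =>
    rcases eq_or_ne p.2 0 with h | h
    · rw [List.foldl_cons, if_neg (by simp [h]), ih]; simp [h]
    · rw [List.foldl_cons, if_pos (by simp [h]), ih]; simp [h]

-- A's flattening loop = B's flatMap comprehension
theorem flatten_eq (dict_matrix : List (String × List (String × Int))) :
    remove_zero_py dict_matrix
      = ((PySem.Dict.ofList dict_matrix : PySem.Dict String (List (String × Int))).values).flatMap
          (fun row => ((PySem.Dict.ofList row : PySem.Dict String Int).values).filter (fun v => v != 0)) := by
  unfold remove_zero_py
  have h : ∀ (its : List (String × List (String × Int))) (a : List Int),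
      its.foldl (fun fl entry => ((PySem.Dict.ofList entry.2 : PySem.Dict String Int).items).foldl
          (fun acc p => if p.2 != 0 then acc ++ [p.2] else acc) fl) a
        = a ++ its.flatMap (fun entry =>
            (((PySem.Dict.ofList entry.2 : PySem.Dict String Int).items).map (fun p => p.2)).filter (fun v => v != 0)) := by
    intro its
    induction its with
    | nil => simp
    | cons e t ih => intro a; rw [List.foldl_cons, inner_foldl_eq, ih]; simp
  rw [h]
  simp [PySem.Dict.values, List.flatMap_map]

-- A's try/except counting loop builds exactly collections.Counter of the list
theorem counter_loop_eq (L : List Int) :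
    L.foldl (fun d value =>
        if d.contains value then d.insert value (d.getD value 0 + 1)
        else d.insert value 1) PySem.Dict.empty
      = PySem.Dict.counter L := by
  have hstep : (fun (d : PySem.Dict Int Int) value =>
        if d.contains value then d.insert value (d.getD value 0 + 1) else d.insert value 1)
      = fun d x => d.insert x (d.getD x 0 + 1) := by
    funext d x
    by_cases h : d.contains x = true
    · simp [h]
    · have hfind : d.items.find? (fun p => p.1 == x) = none := by
        rw [List.find?_eq_none]
        intro p hp
        simp only [PySem.Dict.contains, Bool.not_eq_true, List.any_eq_false, beq_iff_eq] at h
        simpa using h p hp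
      have h0 : d.getD x 0 = 0 := by simp [PySem.Dict.getD, PySem.Dict.get?, hfind]
      simp [h, h0]
  rw [hstep, PySem.Dict.foldl_insert_getD_add_one_eq_counter]

-- the run-length sweep on a sorted list: counts are the multiplicities,
-- the keys are strictly increasing and are exactly the values present
theorem runs_spec (s : List Int) (hs : s.Pairwise (· ≤ ·)) :
    (pyB_runs s).2 = (pyB_runs s).1.map (fun k => ((s.count k : Nat) : Int))
    ∧ (pyB_runs s).1.Pairwise (· < ·)
    ∧ (∀ x, x ∈ (pyB_runs s).1 ↔ x ∈ s) := by
  induction s using pyB_runs.induct with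
  | case1 => simp [pyB_runs]
  | case2 v rest ih =>
    rw [List.pairwise_cons] at hs
    obtain ⟨hv, hrest⟩ := hs
    have hsplit : rest.takeWhile (fun x => x == v) ++ rest.dropWhile (fun x => x == v) = rest :=
      List.takeWhile_append_dropWhile
    have hsame : ∀ x ∈ rest.takeWhile (fun x => x == v), x = v := by
      intro x hx
      simpa using List.mem_takeWhile_imp hx
    have hrest' : (rest.dropWhile (fun x => x == v)).Pairwise (· ≤ ·) :=
      hrest.sublist (List.dropWhile_sublist _)
    have hgt : ∀ x ∈ rest.dropWhile (fun x => x == v), v < x := by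
      cases hr : rest.dropWhile (fun x => x == v) with
      | nil => simp
      | cons h t =>
        have hh_mem : h ∈ rest := (List.dropWhile_sublist _).subset (hr ▸ List.mem_cons_self)
        have hhne : h ≠ v := by
          have := List.head?_dropWhile_not (fun x => x == v) rest
          rw [hr] at this
          simpa using this
        have hvh : v < h := lt_of_le_of_ne (hv h hh_mem) (Ne.symm hhne)
        intro x hx
        rcases List.mem_cons.mp hx with rfl | hx'
        · exact hvh
        · have := (hr ▸ hrest' : (h :: t).Pairwise (· ≤ ·))
          exact lt_of_lt_of_le hvh ((List.pairwise_cons.mp this).1 x hx')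
    obtain ⟨ih1, ih2, ih3⟩ := ih hrest'
    have hstep : pyB_runs (v :: rest) =
        (v :: (pyB_runs (rest.dropWhile (fun x => x == v))).1,
         ((1 + (rest.takeWhile (fun x => x == v)).length : Nat) : Int)
           :: (pyB_runs (rest.dropWhile (fun x => x == v))).2) := by
      rw [pyB_runs]
    have hcv : (v :: rest).count v = 1 + (rest.takeWhile (fun x => x == v)).length := by
      rw [List.count_cons_self]
      conv_lhs => rw [← hsplit]
      rw [List.count_append]
      have h1 : (rest.takeWhile (fun x => x == v)).count v
          = (rest.takeWhile (fun x => x == v)).length := by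
        rw [List.count_eq_length]
        intro b hb
        simp [hsame b hb]
      have h2 : (rest.dropWhile (fun x => x == v)).count v = 0 :=
        List.count_eq_zero.mpr (fun h => lt_irrefl v (hgt v h))
      omega
    have hck : ∀ k, v < k → (v :: rest).count k = (rest.dropWhile (fun x => x == v)).count k := by
      intro k hk
      rw [List.count_cons_of_ne (ne_of_gt hk).symm]
      conv_lhs => rw [← hsplit]
      rw [List.count_append]
      have h1 : (rest.takeWhile (fun x => x == v)).count k = 0 :=
        List.count_eq_zero.mpr (fun h => absurd (hsame k h) (ne_of_gt hk))
      omega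
    rw [hstep]
    refine ⟨?_, ?_, ?_⟩
    · dsimp only
      rw [List.map_cons]
      congr 1
      · rw [hcv]
      · rw [ih1]
        apply List.map_congr_left
        intro k hk
        rw [hck k (hgt k ((ih3 k).mp hk))]
    · dsimp only
      exact List.pairwise_cons.mpr ⟨fun k hk => hgt k ((ih3 k).mp hk), ih2⟩
    · intro x
      dsimp only
      simp only [List.mem_cons, ih3 x]
      constructor
      · rintro (rfl | hx)
        · exact Or.inl rfl
        · exact Or.inr ((hsplit ▸ List.mem_append_right _ hx))
      · rintro (rfl | hx)
        · exact Or.inl rfl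
        · rw [← hsplit] at hx
          rcases List.mem_append.mp hx with hx' | hx'
          · exact Or.inl (hsame x hx')
          · exact Or.inr hx'

-- sorting A's counter items by key is exactly B's run-length encoding of the sorted values
theorem main_eq (L : List Int) :
    sort_dictionary_py (PySem.Dict.counter L)
      = pyB_runs (PySem.List.sorted L (fun v => v) false) := by
  have hs : (PySem.List.sorted L (fun v => v) false).Pairwise (· ≤ ·) := by
    simpa using PySem.List.sorted_pairwise L (fun v => v)
  obtain ⟨h2, hlt, hmem⟩ := runs_spec _ hs
  have hpermLs : (PySem.List.sorted L (fun v => v) false).Perm L :=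
    PySem.List.sorted_perm L (fun v => v) false
  have hcnt : ∀ k : Int, (PySem.List.sorted L (fun v => v) false).count k = L.count k :=
    fun k => hpermLs.count_eq k
  have hnodup1 : (pyB_runs (PySem.List.sorted L (fun v => v) false)).1.Nodup :=
    hlt.imp ne_of_lt
  have hperm1 : (pyB_runs (PySem.List.sorted L (fun v => v) false)).1.Perm (PySem.Set.ofList L) :=
    (List.perm_ext_iff_of_nodup hnodup1 (PySem.Set.nodup_ofList L)).mpr
      (fun x => by rw [hmem, PySem.Set.mem_ofList]; exact hpermLs.mem_iff)
  have hpermys :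
      ((pyB_runs (PySem.List.sorted L (fun v => v) false)).1.map
          (fun k => (k, ((L.count k : Nat) : Int)))).Perm ((PySem.Dict.counter L).items) := by
    rw [PySem.Dict.items_counter]
    exact hperm1.map _
  have hpair :
      ((pyB_runs (PySem.List.sorted L (fun v => v) false)).1.map
          (fun k => (k, ((L.count k : Nat) : Int)))).Pairwise (fun a b => a.1 < b.1) :=
    by refine List.Pairwise.map _ ?_ hlt; intro a b h; exact h
  have hsorted : PySem.List.sorted ((PySem.Dict.counter L).items) (fun it => it.1) false
      = (pyB_runs (PySem.List.sorted L (fun v => v) false)).1.map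
          (fun k => (k, ((L.count k : Nat) : Int))) :=
    PySem.List.sorted_eq_of_perm_of_pairwise_lt _ _ _ hpermys hpair
  show (PySem.List.sorted ((PySem.Dict.counter L).items) (fun it => it.1) false).foldl
      (fun kc item => (kc.1 ++ [item.1], kc.2 ++ [item.2])) ([], [])
      = pyB_runs (PySem.List.sorted L (fun v => v) false)
  rw [hsorted]
  rw [show (fun (kc : List Int × List Int) (item : Int × Int) => (kc.1 ++ [item.1], kc.2 ++ [item.2]))
        = (fun s e => ((fun a (i : Int × Int) => a ++ [i.1]) s.1 e, (fun a (i : Int × Int) => a ++ [i.2]) s.2 e)) from rfl,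
      PySem.List.foldl_prod_mk (f := fun a (i : Int × Int) => a ++ [i.1])
        (g := fun a (i : Int × Int) => a ++ [i.2])
        (l := (pyB_runs (PySem.List.sorted L (fun v => v) false)).1.map
          (fun k => (k, ((L.count k : Nat) : Int)))) (a := []) (b := []),
      PySem.List.foldl_append_singleton_eq_map,
      PySem.List.foldl_append_singleton_eq_map]
  simp only [List.nil_append, List.map_map]
  refine Prod.ext ?_ ?_
  · simp [Function.comp_def]
  · dsimp only
    rw [h2]
    apply List.map_congr_left
    intro k hk
    simp [hcnt k]

-- ===== VERDICT (by name: the statement is the Claim_ definition above) =====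
theorem occurrences_counter_py_spec : Claim_equal_occurrences_counter_py := by
  intro dm _
  unfold Spec_occurrences_counter_py
  show sort_dictionary_py ((remove_zero_py dm).foldl
      (fun d value => if d.contains value then d.insert value (d.getD value 0 + 1)
        else d.insert value 1) PySem.Dict.empty)
    = pyB_runs (PySem.List.sorted
        (((PySem.Dict.ofList dm : PySem.Dict String (List (String × Int))).values).flatMap
          (fun row => ((PySem.Dict.ofList row : PySem.Dict String Int).values).filter (fun v => v != 0)))
        (fun v => v) false)
  rw [flatten_eq, counter_loop_eq, main_eq]
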